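-- pv_equiv track=rewrite | github.com/erasify/Careerpath_detection-AI-ML | career_path_detector/utils/cleaner.py | _highest_education
-- ===== SOURCE A (Python) =====
-- def _highest_education(education: list) -> str:
--     order = {
--         "phd": 5, "doctorate": 5, "master": 4, "mba": 4,
--         "bachelor": 3, "associate": 2, "diploma": 1, "certificate": 1,
--     }
--     best, best_label = 0, "unknown"
--     for edu in education:
--         deg = (edu.get("degree") or "").lower()
--         for key, rank in order.items():
--             if key in deg and rank > best:
--                 best, best_label = rank, key
--     return best_label
-- ===== SOURCE B (Python) =====
-- def _highest_education(education: list) -> str: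
--     ORDER = [
--         ("phd", 5), ("doctorate", 5), ("master", 4), ("mba", 4),
--         ("bachelor", 3), ("associate", 2), ("diploma", 1), ("certificate", 1),
--     ]
--     degs = [(edu.get("degree") or "").lower() for edu in education]
--     best = max((rank for deg in degs for key, rank in ORDER if key in deg), default=0)
--     if best == 0:
--         return "unknown"
--     return next(key for deg in degs for key, rank in ORDER
--                 if rank == best and key in deg)
-- ===== Notes on version B (the rewrite author's own statement) =====
-- stated objective: alternative
-- what changed: Replaces A's single fold that threads a (best,label) pair through strictly-improving updates with a two-pass scheme: first compute the maximum rank over all matched keywords (max with default 0), then return the first keyword in scan order whose rank equals that maximum (next over a generator), with no mutable best/label state.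
import Mathlib
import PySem

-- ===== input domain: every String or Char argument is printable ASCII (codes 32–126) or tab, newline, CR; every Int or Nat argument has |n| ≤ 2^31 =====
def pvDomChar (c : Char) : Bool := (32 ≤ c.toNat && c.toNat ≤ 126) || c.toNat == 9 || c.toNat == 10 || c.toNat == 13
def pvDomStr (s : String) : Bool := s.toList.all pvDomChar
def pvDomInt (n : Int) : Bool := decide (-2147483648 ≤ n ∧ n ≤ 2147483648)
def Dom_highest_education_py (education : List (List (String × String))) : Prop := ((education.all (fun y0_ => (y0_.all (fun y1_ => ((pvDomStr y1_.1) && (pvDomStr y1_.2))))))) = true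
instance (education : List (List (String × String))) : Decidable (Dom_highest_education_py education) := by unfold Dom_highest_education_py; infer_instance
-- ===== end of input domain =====

-- B replaces A's single strictly-improving (best,label) fold by a two-pass scheme
-- (max rank first, then first keyword of that rank in scan order): alternative decomposition, same cost.

-- ===== PORT A =====
def highest_education_py (education : List (List (String × String))) : String :=
  let order : PySem.Dict String Int := PySem.Dict.ofList
    [("phd", 5), ("doctorate", 5), ("master", 4), ("mba", 4),
     ("bachelor", 3), ("associate", 2), ("diploma", 1), ("certificate", 1)]
  let r := education.foldl (fun (st : Int × String) edu =>
      let deg := PySem.Str.lower (((PySem.Dict.mk edu).get? "degree").getD "")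
      order.items.foldl (fun (st : Int × String) kr =>
        if PySem.Str.isIn kr.1 deg && decide (kr.2 > st.1) then (kr.2, kr.1) else st) st)
    ((0 : Int), "unknown")
  r.2

-- ===== PORT B =====
def bOrder : List (String × Int) :=
  [("phd", 5), ("doctorate", 5), ("master", 4), ("mba", 4),
   ("bachelor", 3), ("associate", 2), ("diploma", 1), ("certificate", 1)]

def highest_education_py_alt (education : List (List (String × String))) : String :=
  let degs := education.map (fun edu =>
    PySem.Str.lower (((PySem.Dict.mk edu).get? "degree").getD ""))
  let best := PySem.List.maxD
    (degs.flatMap (fun deg => (bOrder.filter (fun kr => PySem.Str.isIn kr.1 deg)).map (·.2)))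
    (fun x => x) (0 : Int)
  if best == 0 then "unknown"
  else
    match degs.flatMap (fun deg =>
        bOrder.filter (fun kr => kr.2 == best && PySem.Str.isIn kr.1 deg)) with
    | kr :: _ => kr.1
    | [] => "unknown"  -- unreachable: in Source B the generator behind next() is nonempty when best ≠ 0

-- ===== PRECONDITION & SPEC =====
def Spec_highest_education_py (education : List (List (String × String))) (out : String) : Prop := out = highest_education_py_alt education
instance (education : List (List (String × String))) (out : String) : Decidable (Spec_highest_education_py education out) := by unfold Spec_highest_education_py; infer_instance

-- ===== CLAIM (what is proved, stated in full; the proofs are below) =====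
def Claim_equal_highest_education_py : Prop := ∀ (education : List (List (String × String))), Dom_highest_education_py education → Spec_highest_education_py education (highest_education_py education)

-- ===== LEMMAS AND PROOFS =====

-- a "pair" is (lowered degree string, (keyword, rank))
def pvMatch (p : String × String × Int) : Bool := PySem.Str.isIn p.2.1 p.1
def pvStep (st : Int × String) (p : String × String × Int) : Int × String :=
  if pvMatch p && decide (p.2.2 > st.1) then (p.2.2, p.2.1) else st
def pvMax (b : Int) (ps : List (String × String × Int)) : Int :=
  ps.foldl (fun a p => if pvMatch p then max a p.2.2 else a) b

lemma le_pvMax (ps : List (String × String × Int)) : ∀ b : Int, b ≤ pvMax b ps := by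
  induction ps with
  | nil => intro b; simp [pvMax]
  | cons p ps ih =>
    intro b
    show b ≤ pvMax (if pvMatch p then max b p.2.2 else b) ps
    refine le_trans ?_ (ih _)
    split <;> simp

lemma pvMax_attain (ps : List (String × String × Int)) :
    ∀ b : Int, pvMax b ps = b ∨ ∃ p ∈ ps, pvMatch p = true ∧ p.2.2 = pvMax b ps := by
  induction ps with
  | nil => intro b; left; simp [pvMax]
  | cons p ps ih =>
    intro b
    have hrec : pvMax b (p :: ps) = pvMax (if pvMatch p then max b p.2.2 else b) ps := rfl
    rcases ih (if pvMatch p then max b p.2.2 else b) with h | ⟨q, hq, hm, he⟩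
    · by_cases hc : pvMatch p = true
      · rcases max_choice b p.2.2 with hmx | hmx
        · left; rw [hrec, h, hc]; simp [hmx]
        · right; exact ⟨p, List.mem_cons_self, hc, by rw [hrec, h, hc]; simp [hmx]⟩
      · left; rw [hrec, h]; simp [hc]
    · right; exact ⟨q, List.mem_cons_of_mem _ hq, hm, by rw [hrec]; exact he⟩

lemma pvFold_char (ps : List (String × String × Int)) : ∀ (b : Int) (l : String),
    ps.foldl pvStep (b, l) =
      match ps.find? (fun p => pvMatch p && decide (b < p.2.2) && (p.2.2 == pvMax b ps)) with
      | some p => (pvMax b ps, p.2.1)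
      | none => (b, l) := by
  induction ps with
  | nil => intro b l; simp
  | cons p ps ih =>
    intro b l
    have hrec : pvMax b (p :: ps) = pvMax (if pvMatch p then max b p.2.2 else b) ps := rfl
    by_cases hc : pvMatch p = true
    · by_cases hbr : b < p.2.2
      · have hstep : List.foldl pvStep (b, l) (p :: ps) = List.foldl pvStep (p.2.2, p.2.1) ps := by
          simp [List.foldl_cons, pvStep, hc, hbr]
        have hmax : pvMax b (p :: ps) = pvMax p.2.2 ps := by
          rw [hrec, hc]; simp [max_eq_right (le_of_lt hbr)]
        have hpM : p.2.2 ≤ pvMax p.2.2 ps := le_pvMax ps p.2.2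
        by_cases heq : p.2.2 = pvMax p.2.2 ps
        · have hnone : ps.find? (fun q => pvMatch q && decide (p.2.2 < q.2.2) && (q.2.2 == pvMax p.2.2 ps)) = none := by
            apply List.find?_eq_none.mpr
            intro q hq
            simp only [Bool.and_eq_true, beq_iff_eq, decide_eq_true_eq, not_and]
            intro hand hqe
            obtain ⟨-, hlt⟩ := hand
            omega
          have hfind : (p :: ps).find? (fun q => pvMatch q && decide (b < q.2.2) && (q.2.2 == pvMax b (p :: ps))) = some p := by
            apply List.find?_cons_of_pos
            simp [hc, hbr, hmax, ← heq]
          rw [hstep, ih p.2.2 p.2.1, hnone, hfind]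
          rw [hmax, ← heq]
        · have hlt : p.2.2 < pvMax p.2.2 ps := lt_of_le_of_ne hpM heq
          have hMb : b < pvMax p.2.2 ps := lt_trans hbr hlt
          have hfalse : ¬ (pvMatch p && decide (b < p.2.2) && (p.2.2 == pvMax b (p :: ps))) = true := by
            rw [hmax]; simp [heq]
          have hcong : (fun q : String × String × Int => pvMatch q && decide (b < q.2.2) && (q.2.2 == pvMax b (p :: ps)))
              = (fun q : String × String × Int => pvMatch q && decide (p.2.2 < q.2.2) && (q.2.2 == pvMax p.2.2 ps)) := by
            funext q
            rw [hmax]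
            rcases eq_or_ne q.2.2 (pvMax p.2.2 ps) with hqe | hqe
            · have h1 : decide (b < q.2.2) = true := by rw [hqe]; exact decide_eq_true hMb
              have h2 : decide (p.2.2 < q.2.2) = true := by rw [hqe]; exact decide_eq_true hlt
              rw [h1, h2]
            · have hbe : (q.2.2 == pvMax p.2.2 ps) = false := by simpa using hqe
              rw [hbe]; simp
          have hskip : List.find? (fun q : String × String × Int => pvMatch q && decide (b < q.2.2) && (q.2.2 == pvMax b (p :: ps))) (p :: ps)
              = List.find? (fun q : String × String × Int => pvMatch q && decide (b < q.2.2) && (q.2.2 == pvMax b (p :: ps))) ps :=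
            List.find?_cons_of_neg hfalse
          rw [hstep, ih p.2.2 p.2.1, hskip, hcong]
          cases hfind : ps.find? (fun q : String × String × Int => pvMatch q && decide (p.2.2 < q.2.2) && (q.2.2 == pvMax p.2.2 ps)) with
          | some q => simp [hmax]
          | none =>
            exfalso
            rcases pvMax_attain ps p.2.2 with h | ⟨q, hq, hm, he⟩
            · exact heq h.symm
            · have hnq := List.find?_eq_none.mp hfind q hq
              simp [hm, he] at hnq
              omega
      · have hstep : List.foldl pvStep (b, l) (p :: ps) = List.foldl pvStep (b, l) ps := by
          simp [List.foldl_cons, pvStep, hbr]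
        have hmax : pvMax b (p :: ps) = pvMax b ps := by
          rw [hrec, hc]; simp [max_eq_left (le_of_not_gt hbr)]
        have hfalse : ¬ (pvMatch p && decide (b < p.2.2) && (p.2.2 == pvMax b (p :: ps))) = true := by
          simp [hbr]
        have hskip2 : List.find? (fun q : String × String × Int => pvMatch q && decide (b < q.2.2) && (q.2.2 == pvMax b (p :: ps))) (p :: ps)
            = List.find? (fun q : String × String × Int => pvMatch q && decide (b < q.2.2) && (q.2.2 == pvMax b (p :: ps))) ps :=
          List.find?_cons_of_neg hfalse
        rw [hstep, ih b l, hskip2, hmax]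
    · have hstep : List.foldl pvStep (b, l) (p :: ps) = List.foldl pvStep (b, l) ps := by
        simp [List.foldl_cons, pvStep, hc]
      have hmax : pvMax b (p :: ps) = pvMax b ps := by
        rw [hrec]; simp [hc]
      have hfalse : ¬ (pvMatch p && decide (b < p.2.2) && (p.2.2 == pvMax b (p :: ps))) = true := by
        simp [hc]
      have hskip3 : List.find? (fun q : String × String × Int => pvMatch q && decide (b < q.2.2) && (q.2.2 == pvMax b (p :: ps))) (p :: ps)
          = List.find? (fun q : String × String × Int => pvMatch q && decide (b < q.2.2) && (q.2.2 == pvMax b (p :: ps))) ps :=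
        List.find?_cons_of_neg hfalse
      rw [hstep, ih b l, hskip3, hmax]


def pvDeg (edu : List (String × String)) : String :=
  PySem.Str.lower (((PySem.Dict.mk edu).get? "degree").getD "")

def pvPairs (education : List (List (String × String))) : List (String × String × Int) :=
  (education.map pvDeg).flatMap (fun deg => bOrder.map (fun kr => (deg, kr)))

lemma pvPairs_rank_pos (education : List (List (String × String))) :
    ∀ p ∈ pvPairs education, 1 ≤ p.2.2 := by
  intro p hp
  rw [pvPairs] at hp
  simp only [List.mem_flatMap, List.mem_map] at hp
  obtain ⟨deg, -, kr, hkr, rfl⟩ := hp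
  have hall : ∀ kr ∈ bOrder, 1 ≤ kr.2 := by decide
  exact hall _ hkr

lemma pvNested (education : List (List (String × String))) : ∀ i : Int × String,
    education.foldl (fun st edu => bOrder.foldl (fun st kr => pvStep st (pvDeg edu, kr)) st) i
      = (pvPairs education).foldl pvStep i := by
  induction education with
  | nil => intro i; rfl
  | cons e es ih =>
    intro i
    show es.foldl _ (bOrder.foldl (fun st kr => pvStep st (pvDeg e, kr)) i)
        = (((bOrder.map (fun kr => (pvDeg e, kr))) ++ pvPairs es).foldl pvStep i)
    rw [List.foldl_append, List.foldl_map, ← ih]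

lemma A_char (education : List (List (String × String))) :
    highest_education_py education = ((pvPairs education).foldl pvStep ((0 : Int), "unknown")).2 := by
  rw [← pvNested education ((0 : Int), "unknown")]
  rfl

lemma pvMax_filter (ps : List (String × String × Int)) (b : Int) :
    pvMax b ps = ((ps.filter pvMatch).map (·.2.2)).foldl max b := by
  rw [List.foldl_map, List.foldl_filter]
  rfl

lemma B_char (education : List (List (String × String))) :
    highest_education_py_alt education =
      (match (pvPairs education).find? (fun p => pvMatch p && decide ((0:Int) < p.2.2) && (p.2.2 == pvMax 0 (pvPairs education))) with
       | some p => p.2.1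
       | none => "unknown") := by
  have hMr : (education.map pvDeg).flatMap
        (fun deg => (bOrder.filter (fun kr => PySem.Str.isIn kr.1 deg)).map (·.2))
      = ((pvPairs education).filter pvMatch).map (·.2.2) := by
    simp only [pvPairs, List.filter_flatMap, List.map_flatMap, List.filter_map, List.map_map]
    rfl
  have hL : ∀ M : Int, (education.map pvDeg).flatMap
        (fun deg => bOrder.filter (fun kr => kr.2 == M && PySem.Str.isIn kr.1 deg))
      = ((pvPairs education).filter (fun p => p.2.2 == M && pvMatch p)).map (·.2) := by
    intro M
    simp only [pvPairs, List.filter_flatMap, List.map_flatMap, List.filter_map, List.map_map]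
    congr 1
    funext deg
    have hid : ((fun x : String × String × Int => x.2) ∘ fun kr : String × Int => (deg, kr)) = id := rfl
    rw [hid, List.map_id]
    rfl
  have hbest : PySem.List.maxD
      ((education.map pvDeg).flatMap
        (fun deg => (bOrder.filter (fun kr => PySem.Str.isIn kr.1 deg)).map (·.2)))
      (fun x => x) (0 : Int) = pvMax 0 (pvPairs education) := by
    rw [pvMax_filter, ← hMr]
    cases hmr : (education.map pvDeg).flatMap
        (fun deg => (bOrder.filter (fun kr => PySem.Str.isIn kr.1 deg)).map (·.2)) with
    | nil => rfl
    | cons x t =>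
      have hx : 0 ≤ x := by
        have hxm : x ∈ ((pvPairs education).filter pvMatch).map (·.2.2) := by
          rw [← hMr, hmr]; exact List.mem_cons_self
        simp only [List.mem_map] at hxm
        obtain ⟨p, hp, rfl⟩ := hxm
        have := pvPairs_rank_pos education p (List.mem_of_mem_filter hp)
        omega
      simp only [PySem.List.maxD, PySem.List.max?_id_cons, Option.getD_some, List.foldl_cons]
      rw [max_eq_right hx]
  -- now unfold B and case on whether the maximum is zero
  show (if PySem.List.maxD
          ((education.map pvDeg).flatMap
            (fun deg => (bOrder.filter (fun kr => PySem.Str.isIn kr.1 deg)).map (·.2)))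
          (fun x => x) (0 : Int) == 0 then "unknown"
        else
          match (education.map pvDeg).flatMap
              (fun deg => bOrder.filter (fun kr => kr.2 == PySem.List.maxD
                ((education.map pvDeg).flatMap
                  (fun deg => (bOrder.filter (fun kr => PySem.Str.isIn kr.1 deg)).map (·.2)))
                (fun x => x) (0 : Int) && PySem.Str.isIn kr.1 deg)) with
          | kr :: _ => kr.1
          | [] => "unknown") = _
  rw [hbest]
  by_cases hM : pvMax 0 (pvPairs education) = 0
  · rw [if_pos (by simpa using hM)]
    have hnone : (pvPairs education).find? (fun p => pvMatch p && decide ((0:Int) < p.2.2) && (p.2.2 == pvMax 0 (pvPairs education))) = none := by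
      apply List.find?_eq_none.mpr
      intro p hp
      simp only [Bool.and_eq_true, beq_iff_eq, decide_eq_true_eq, not_and]
      intro hand hpe
      obtain ⟨-, h0⟩ := hand
      omega
    rw [hnone]
  · have hMpos : (0:Int) < pvMax 0 (pvPairs education) := lt_of_le_of_ne (le_pvMax _ 0) (Ne.symm hM)
    rw [if_neg (by simpa using hM)]
    rw [hL (pvMax 0 (pvPairs education))]
    have hpred : (fun p : String × String × Int => pvMatch p && decide ((0:Int) < p.2.2) && (p.2.2 == pvMax 0 (pvPairs education)))
        = (fun p : String × String × Int => p.2.2 == pvMax 0 (pvPairs education) && pvMatch p) := by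
      funext p
      rcases eq_or_ne p.2.2 (pvMax 0 (pvPairs education)) with he | he
      · have h1 : decide ((0:Int) < p.2.2) = true := by rw [he]; exact decide_eq_true hMpos
        have h2 : (p.2.2 == pvMax 0 (pvPairs education)) = true := by simpa using he
        rw [h1, h2]; simp
      · have h2 : (p.2.2 == pvMax 0 (pvPairs education)) = false := by simpa using he
        rw [h2]; simp
    rw [hpred, ← List.head?_filter]
    cases hfq : List.filter (fun p : String × String × Int => p.2.2 == pvMax 0 (pvPairs education) && pvMatch p) (pvPairs education) with
    | nil => rfl
    | cons q t => rfl

-- ===== VERDICT (by name: the statement is the Claim_ definition above) =====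
theorem highest_education_py_spec : Claim_equal_highest_education_py := by
  unfold Claim_equal_highest_education_py
  intro education _
  unfold Spec_highest_education_py
  rw [A_char education, pvFold_char (pvPairs education) 0 "unknown", B_char education]
  cases hf : (pvPairs education).find? (fun p => pvMatch p && decide ((0:Int) < p.2.2) && (p.2.2 == pvMax 0 (pvPairs education))) with
  | some p => rfl
  | none => rfl
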